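/-
  THE CODEBOOK PREDICATES (unit Q4 of WORKPLAN §2): the clauses of `VorbisOK f` from the identification header to the codebooks
  (INVARIANTS §3.1, §3.2, the codebook rows of §6; design/I2; DECISIONS §1 FIX 1–4, 6, 7, 12 and D-2, D-4, D-18 – D-20), as
  definitions over `(mem : Mem)`, the ghost block predicate `Blk : Block → Prop` ("is an allocated block", Vorbis/Blocks.lean), the
  decoder object's address `f` and a codebook's address `c`. NO definition, clause, transient or frame lemma mentions the live set:
  only the USE lemmas do, through `(hL : BlkLive Blk Live)`.
  `import Vorbis.Codebook`, `open X86 X86.User Asan Vorbis`. Worked examples of everything: Vorbis/CodebookTest.lean.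

  FILES
    Vorbis/Codebook/Basic.lean    ZeroFill · countBelow · BS · index arithmetic                    (no block vocabulary: that is Vorbis/Blocks.lean)
    Vorbis/Codebook/Header.lean   HeaderOK (HD1–HD3) · CommentOK / CommentsOK (CM1–CM3) · CodebooksOK (F1, F2) · CB0
    Vorbis/Codebook/Book.lean     Codebook.N · Codebook.K1 … K6 · CodebookOK · USE · FRAME · DecodeRawResult / DecodeResult
    Vorbis/Codebook/Build.lean    the transient shapes: LenL (L) · K7at · K7 · CNT · CNT' · VAL · ZV · ZF · Fresh · K3t · FHInit / K5b · BooksOK;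
                                  the groups as `Group.Good` / `Group.Stable`

  CONVENTIONS (those of Vorbis/Fields.lean and Vorbis/Blocks.lean). A field that is a C `int` is an `Int` (`Codebook.entries mem c`), a
  `uint8` / pointer a `Nat`. An INDEX is a `Nat` compared with the `Int` field: `(i : Int) < Codebook.entries mem c`; a block SIZE is
  the field's `.toNat`. `omega` moves between the two.
    Blk ⟨p, n⟩                   INVARIANTS' `Block(p, n)`: `p` is the base of an allocated block of EXACTLY `n` bytes. The one clause
                                 that says "at least" (K6's `multiplicands`) is `∃ sz, n ≤ sz ∧ Blk ⟨p, sz⟩`.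
    hok : BlkOK Blk              allocated blocks lie in the data space and are equal or disjoint: `p ≠ 0` (`hok.ne_null`), no wrap
    hL : BlkLive Blk Live        allocated blocks are live: asked by every USE lemma, by nothing else
    hB, hin                      "the struct at `c` lies inside the allocated block `B`": `(hB : Blk B) (hin : B.contains c 2120)`;
                                 from `h0 : CodebooksOK Blk mem f`: `h0.F2`, `h0.cb_in b hb`
    codebooksBlock mem f         the codebooks block `⟨codebooks, 2120·codebook_count⟩`
    Codebook.block c             the struct as a `Block` (an abbreviation of `Block.mk c Off.sizeof.Codebook`)
    Codebook.svBlock mem c       the block behind `sorted_values`: `[sorted_values − 4, sorted_values + 4·se)` (sentinel word + table)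

  CLAUSES, BY THE NAMES OF INVARIANTS.md
    HeaderOK mem f               .HD1 (1 ≤ channels ≤ 16) .HD2 (sample_rate ≠ 0) .HD3 (block sizes 2^a, 2^b, 6 ≤ a ≤ b ≤ 13; `HD3.range`, `HD3.dvd8`)
    CommentOK Blk mem f n        .CM1 vendor · .CM2 comment_list (= H1) · .CM3 the comments below the loop counter n, NULL above (FIX 12)
    CommentsOK Blk mem f         := CommentOK Blk mem f comment_list_length: the group from point SD.2 on
    CodebooksOK Blk mem f        .F1 (1 ≤ codebook_count ≤ 256) .F2 (the block of 2120·count bytes);  CB0 Blk mem f := codebooks = 0 ∨ CodebooksOK (= H4)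
    CodebookOK Blk mem c         .K1 .K2 .K3 (.dense : K3n, .sparse : K3s) .K4 (.sc .sv .sentinel .null) .K4c .K5 .K6 (.type_02 .prod_le .mults .null)
                                 K3e does not exist (FIX 4). `Codebook.K7` is optional and NOT a field (D-18); its hard half is `K7at`
                                 (both in Build.lean).
    Codebook.N mem c             N(c) = sparse ? sorted_entries : entries;  `N_dense`, `N_sparse`, `h.N_nonneg`, `h.N_le_entries`
    BooksOK Blk mem f i          ∀ b < i, CodebookOK cb(b);  `.zero .succ .mono .book .transfer .frame .reblk .carry`

  USE (1): ONE lemma per access, `site_…`, with the block-liveness `hL` first and the address LAST as a free `a` plus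
  `ha : a = <accessor form>` (`rfl`, or `by simp only [vacc, voff]; omega`). It returns `s : Site Live a n`; from there
  `s.acc hc` (the check), `s.acc_addr hc` (the register form `(addr a).toNat`), `s.acc_range hc`, `s.has hc hLay` (the access itself),
  `s.inside hc`, `s.inLive`. The pattern is always:   have s := h.site_… hL … (a := …) (by simp only [vacc, voff]; omega) ; exact s.acc hc
    f->codebooks[b]                        CodebooksOK.site_cb_field / .cb_in / .cb_inside / .cb_disjoint / .cb_kept ; BooksOK.book
    c->x (any field), c->fast_huffman[k]   Codebook.site_field / Codebook.site_fast_huffman                (inside the struct: need only hB, hin)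
    c->codeword_lengths[i], i < N(c)       h.site_codeword_lengths
      … [fast_huffman[k]] (fast path)      h.site_lengths_of_fast                                          (K5 + K3)
      … [sorted_values[x]] (dense search)  h.site_lengths_of_sorted                                        (K4c + K3n)
    c->codewords[i], i < entries, dense    h.site_codewords
    c->sorted_codewords[x], x ≤ se         h.site_sorted_codewords
    c->sorted_values[x], x < se            h.site_sorted_values
    c->sorted_values[-1]                   h.site_sorted_values_m1 ;  value: h.K4.sentinel
    c->sorted_values[var], var ≥ −1        h.site_sortedValue (DECODE's translation) ;  word address: addr_add_word_mul4
    c->multiplicands[z*dim + i]            h.site_multiplicands / h.multiplicands_index_lt ; mult_index_lt, mult_run_le, mult_offset_lt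
    pointer tests of scalar_raw            h.codewords_ne_zero_iff hok, h.sorted_codewords_ne_zero_iff hok, h.not_both_null hok, h.sorted_values_ge hok
    comment_list[i], vendor[j]             CM2.site_slot ; site_string
    under construction                     K3t.site_codewords / K3t.site_lengths ; VAL.site_lengths

  FRAME (2): ONE two-address lemma per group `P` ∈ {HeaderOK, CommentOK, CommentsOK, CodebooksOK, CB0}:
      P.transfer : P Blk mem p → ObjEq P.wins mem p mem' f → (∀ B, P.Reads mem p B → B.Kept mem mem')
                   → (∀ B, P.Owns mem p B → Blk B → Blk' B) → P Blk' mem' f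
    (`hk` only for `CommentOK` / `CommentsOK`: the table of comment pointers; `hB` not for `HeaderOK`), with the instances
      P.frame h hs …     `p = f`, `hs : ObjSame f mem mem'` (an allocator call; from `DecodeSame`: `(hs.sub (by decide))` in `transfer`)
      P.transfer h (ObjEq.of_copied hcp (by decide)) …      the struct copy `*f = p`
      P.reblk h hB       `mem' = mem`: only the block predicate changes (an allocation, `setup_temp_free`, an epilogue)
    and `P.owns_blk`, `P.reads_blk` (owned / read blocks are allocated), `P.good : Group.Good P` (`HeaderGroup.good` for `HeaderOK`).
    `CodebookOK` is about an object that does not move: `c` on both sides,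
      CodebookOK.transfer : CodebookOK Blk mem c → (Codebook.block c).Kept mem mem' → (1 ≤ se → (Codebook.svBlock mem c).Kept mem mem')
                   → (∀ B, CodebookOK.Owns mem c B → Blk B → Blk' B) → CodebookOK Blk' mem' c
      CodebookOK.frame (same `Blk`), `.reblk` (same memory), `.frame_writeLE` (one store inside a block disjoint from both),
      `.frame_sameExcept` (a callee's footprint), `.stable : Group.Stable CodebookOK 2120`, `.reads_blk`, `.owns_blk`.
    It reads the struct at `c` and the `sorted_values` block, nothing else. For segments that hold only some clauses:
    `Codebook.SameFields.of_kept` (or `.of_same`), then `K1.frame … K6.frame`, `K5b.frame`. `BooksOK.transfer / .frame / .carry`.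
    A change of the block predicate alone, in either direction (a block was allocated; a temp block was freed), is `reblk`.

  LEMMA DecodeRaw, as a statement: `DecodeRawResult mem c v := v = −1 ∨ 0 ≤ v < N(c)`, `DecodeResult mem c v := v = −1 ∨ 0 ≤ v < entries`;
  pure steps `h.decodeRaw_fast`, `h.decodeRaw_search_sparse / _dense`, `h.decodeRaw_linear`, `h.decode_dense`, `h.decode_sparse hok`
  (the translated word `Codebook.sortedValue mem c v`; −1 ↦ the sentinel −1).

  TRANSIENT (INVARIANTS §6), each with step and frame lemmas: see the header of Vorbis/Codebook/Build.lean. BS: `BS x n se` with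
  `BS.init .mid_lt .right .left .right_lt .left_lt .exit` (Basic.lean).
-/
import Vorbis.Codebook.Build
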